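-- pv_equiv track=rewrite | github.com/bozbalci/mcg | mcg.py | cascade
-- ===== SOURCE A (Python) =====
-- import itertools
--
-- def cascade(iterable, n):
--     clones = list(itertools.tee(iterable, n))
--
--     offset = 0
--     for it in clones:
--         for i in range(offset):
--             next(it, None)
--         offset += 1
--     return zip(*clones)
-- ===== SOURCE B (Python) =====
-- import itertools
-- import collections
--
--
-- def cascade(iterable, n):
--     # Single fixed-size sliding window (deque) instead of n staggered tee clones.
--     if n < 0:
--         raise ValueError("n must be >= 0")
--     it = iter(iterable)
--
--     def gen():
--         if n == 0:
--             return
--         window = collections.deque(itertools.islice(it, n), maxlen=n)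
--         if len(window) == n:
--             yield tuple(window)
--         for x in it:
--             window.append(x)
--             yield tuple(window)
--
--     return gen()
-- ===== Notes on version B (the rewrite author's own statement) =====
-- stated objective: alternative
-- what changed: Replaces the n tee-clones staggered by manual next() calls and an n-way zip with a single deque of fixed size n slid once over the input, yielding the same window tuples lazily; it trades n buffered clone iterators for one explicit window.
import Mathlib
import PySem

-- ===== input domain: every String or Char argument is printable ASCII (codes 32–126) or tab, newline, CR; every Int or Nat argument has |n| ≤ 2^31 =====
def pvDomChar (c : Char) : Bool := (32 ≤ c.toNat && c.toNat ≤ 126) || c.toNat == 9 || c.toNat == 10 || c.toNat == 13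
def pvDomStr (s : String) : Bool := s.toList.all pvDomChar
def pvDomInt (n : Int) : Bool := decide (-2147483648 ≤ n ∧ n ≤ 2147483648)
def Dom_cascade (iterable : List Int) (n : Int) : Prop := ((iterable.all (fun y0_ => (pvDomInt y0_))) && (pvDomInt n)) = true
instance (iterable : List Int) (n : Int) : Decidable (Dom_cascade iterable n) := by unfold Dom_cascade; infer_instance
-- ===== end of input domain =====

-- B replaces A's n staggered tee clones + n-way zip by one fixed-size sliding window
-- slid once over the input (alternative decomposition; equivalence is about the
-- produced sequence of tuples, both Pythons return lazy iterators).

-- ===== PORT A =====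
-- zip(*clones): emit the heads of all clones while every clone is nonempty
-- (zip() with no arguments is empty, hence the ls ≠ [] guard).
def zipAll (ls : List (List Int)) : List (List Int) :=
  if h : ls ≠ [] ∧ ∀ l ∈ ls, l ≠ [] then
    (ls.map List.headI) :: zipAll (ls.map List.tail)
  else []
termination_by ls.headI.length
decreasing_by
  obtain ⟨h1, h2⟩ := h
  cases ls with
  | nil => exact absurd rfl h1
  | cons a as =>
    have ha : a ≠ [] := h2 a (by simp)
    cases a with
    | nil => exact absurd rfl ha
    | cons x xs => simp [List.headI]

def cascade (iterable : List Int) (n : Int) : List (List Int) :=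
  -- clones = list(itertools.tee(iterable, n))
  let clones := List.replicate n.toNat iterable
  -- offset loop: advance clone number `offset` by `offset` elements
  let advanced := (clones.foldl
      (fun (p : List (List Int) × Nat) it => (p.1 ++ [it.drop p.2], p.2 + 1))
      ([], 0)).1
  zipAll advanced

-- ===== PORT B =====
def cascade_alt (iterable : List Int) (n : Int) : List (List Int) :=
  if n < 0 then []          -- B raises ValueError here (outside Pre_cascade)
  else if n = 0 then []
  else
    let k := n.toNat
    let window := iterable.take k
    let init : List (List Int) := if window.length = k then [window] else []
    ((iterable.drop k).foldl
        (fun (p : List (List Int) × List Int) x =>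
          let w := p.2.tail ++ [x]       -- deque append with maxlen = k (window full here)
          (p.1 ++ [w], w))
        (init, window)).1

-- ===== PRECONDITION & SPEC =====
-- Pre_ excludes n < 0, on which A's itertools.tee raises ValueError (B raises too).
def Pre_cascade (iterable : List Int) (n : Int) : Prop := 0 ≤ n
instance (iterable : List Int) (n : Int) : Decidable (Pre_cascade iterable n) := by
  unfold Pre_cascade; infer_instance
def pvWitness_cascade : List Int × Int := ([1, 2, 3, 4], 2)

def Spec_cascade (iterable : List Int) (n : Int) (out : List (List Int)) : Prop := out = cascade_alt iterable n
instance (iterable : List Int) (n : Int) (out : List (List Int)) : Decidable (Spec_cascade iterable n out) := by unfold Spec_cascade; infer_instance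

-- ===== CLAIM (what is proved, stated in full; the proofs are below) =====
def Claim_equal_cascade : Prop := ∀ (iterable : List Int) (n : Int), Dom_cascade iterable n → Pre_cascade iterable n → Spec_cascade iterable n (cascade iterable n)

-- ===== LEMMAS AND PROOFS =====

-- reference sliding-window function both ports are reduced to
def wins (k : Nat) : List Int → List (List Int)
  | [] => []
  | x :: xs => if k ≤ (x :: xs).length then (x :: xs).take k :: wins k xs else []

-- A's offset loop produces the staggered drops
theorem foldA (l : List Int) :
    ∀ (k : Nat) (acc : List (List Int)) (off : Nat),
      ((List.replicate k l).foldl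
        (fun (p : List (List Int) × Nat) it => (p.1 ++ [it.drop p.2], p.2 + 1))
        (acc, off)) =
      (acc ++ (List.range k).map (fun i => l.drop (off + i)), off + k) := by
  intro k
  induction k with
  | zero => intro acc off; simp
  | succ m ih =>
    intro acc off
    simp only [List.replicate_succ, List.foldl_cons, ih, List.range_succ_eq_map]
    simp only [Prod.mk.injEq]
    constructor
    · simp only [List.map_cons, List.map_map, Function.comp_def, List.append_assoc,
        Nat.add_zero, List.singleton_append]
      congr 1
      congr 1
      refine List.map_congr_left fun i _ => ?_
      congr 1
      omega
    · omega

theorem heads_eq (l : List Int) :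
    ∀ (k : Nat), k ≤ l.length →
      (List.range k).map (fun i => (l.drop i).headI) = l.take k := by
  induction l with
  | nil =>
    intro k hk
    have : k = 0 := Nat.le_zero.mp (by simpa using hk)
    subst this; simp
  | cons x xs ih =>
    intro k hk
    cases k with
    | zero => simp
    | succ m =>
      rw [List.range_succ_eq_map]
      simp only [List.map_cons, List.map_map, Function.comp_def, List.drop_zero,
        List.headI, List.take_succ_cons]
      congr 1
      have : ∀ i, ((x :: xs).drop (i + 1)) = xs.drop i := by intro i; simp
      simp only [this]
      exact ih m (by simpa using hk)

theorem zipAll_wins (k : Nat) (hk : 1 ≤ k) :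
    ∀ (l : List Int), zipAll ((List.range k).map (fun i => l.drop i)) = wins k l := by
  intro l
  induction l with
  | nil =>
    rw [zipAll]
    rw [dif_neg]
    · rfl
    · intro ⟨h1, h2⟩
      exact h2 [] (by
        refine List.mem_map.mpr ⟨0, ?_, by simp⟩
        exact List.mem_range.mpr hk) rfl
  | cons x xs ih =>
    by_cases hle : k ≤ (x :: xs).length
    · rw [zipAll, dif_pos]
      · have htails : ((List.range k).map (fun i => (x :: xs).drop i)).map List.tail
            = (List.range k).map (fun i => xs.drop i) := by
          simp only [List.map_map, Function.comp_def]
          refine List.map_congr_left ?_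
          intro i hi
          rcases Nat.eq_or_lt_of_le ((List.mem_range.mp hi).le) with h | h
          · cases i with
            | zero => simp
            | succ m => simp [List.tail_drop]
          · simp [List.tail_drop]
        have hheads : ((List.range k).map (fun i => (x :: xs).drop i)).map List.headI
            = (x :: xs).take k := by
          rw [List.map_map]
          exact heads_eq (x :: xs) k hle
        rw [htails, hheads, ih, wins, if_pos hle]
      · constructor
        · intro hc
          have := List.map_eq_nil_iff.mp hc
          rw [List.range_eq_nil] at this
          omega
        · intro l' hl'
          rcases List.mem_map.mp hl' with ⟨i, hi, rfl⟩
          have : i < k := List.mem_range.mp hi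
          intro hnil
          have := List.drop_eq_nil_iff.mp hnil
          simp at this hle
          omega
    · rw [zipAll, dif_neg, wins, if_neg hle]
      intro ⟨h1, h2⟩
      have hlen : (x :: xs).length < k := by omega
      exact h2 [] (by
        refine List.mem_map.mpr ⟨(x :: xs).length, List.mem_range.mpr hlen, ?_⟩
        simp) rfl

-- characterisation of B's fold
def wFrom (win : List Int) : List Int → List (List Int)
  | [] => []
  | x :: xs => (win.tail ++ [x]) :: wFrom (win.tail ++ [x]) xs

theorem foldB (rest : List Int) :
    ∀ (acc : List (List Int)) (win : List Int),
      ((rest.foldl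
        (fun (p : List (List Int) × List Int) x => (p.1 ++ [p.2.tail ++ [x]], p.2.tail ++ [x]))
        (acc, win))).1 = acc ++ wFrom win rest := by
  induction rest with
  | nil => intro acc win; simp [wFrom]
  | cons x xs ih =>
    intro acc win
    simp only [List.foldl_cons, ih, wFrom, List.append_assoc, List.singleton_append]

theorem wFrom_wins (k : Nat) (hk : 1 ≤ k) :
    ∀ (l : List Int), k ≤ l.length →
      l.take k :: wFrom (l.take k) (l.drop k) = wins k l := by
  intro l
  induction l with
  | nil => intro h; simp at h; omega
  | cons x xs ih =>
    intro hle
    rw [wins, if_pos hle]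
    congr 1
    by_cases hlt : k ≤ xs.length
    · have hkx : k < (x :: xs).length := by simp; omega
      rw [List.drop_eq_getElem_cons hkx, wFrom]
      have hw : ((x :: xs).take k).tail ++ [(x :: xs)[k]] = xs.take k := by
        obtain ⟨m, rfl⟩ := Nat.exists_eq_add_of_le hk
        have hgx : (x :: xs)[1 + m]'hkx = xs[m]'(by simp at hkx; omega) := by
          simp [List.getElem_cons_succ, Nat.add_comm 1 m]
        rw [hgx]
        rw [Nat.add_comm 1 m, List.take_succ_cons, List.tail_cons]
        rw [List.take_add_one]
        congr 1
        rw [List.getElem?_eq_getElem (by omega)]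
        rfl
      have hrest : (x :: xs).drop (k + 1) = xs.drop k := by simp
      rw [hw, hrest, ← ih hlt]
    · have hnil : (x :: xs).drop k = [] := by
        rw [List.drop_eq_nil_iff]; simp at hle ⊢; omega
      have hnil2 : xs.length < k := by omega
      rw [hnil, wFrom]
      cases xs with
      | nil => rfl
      | cons y ys => rw [wins, if_neg (by simp at hnil2 ⊢; omega)]

theorem altB (l : List Int) (k : Nat) (hk : 1 ≤ k) :
    (if (l.take k).length = k then [l.take k] else []) ++ wFrom (l.take k) (l.drop k)
      = wins k l := by
  by_cases hle : k ≤ l.length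
  · rw [if_pos (by simp [Nat.min_eq_left hle]), ← wFrom_wins k hk l hle]
    rfl
  · have h1 : (l.take k).length ≠ k := by simp; omega
    have h2 : l.drop k = [] := by rw [List.drop_eq_nil_iff]; omega
    rw [if_neg h1, h2, wFrom]
    cases l with
    | nil => rfl
    | cons x xs =>
      rw [wins, if_neg hle]
      rfl

-- ===== VERDICT (by name: the statement is the Claim_ definition above) =====
theorem cascade_spec : Claim_equal_cascade := by
  intro iterable n _ hpre
  unfold Spec_cascade cascade cascade_alt
  have hn := hpre
  unfold Pre_cascade at hn
  rw [if_neg (by omega)]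
  by_cases h0 : n = 0
  · subst h0
    rw [if_pos rfl]
    simp only [Int.toNat_zero, List.replicate_zero, List.foldl_nil]
    rw [zipAll, dif_neg]
    intro hcon
    exact hcon.1 rfl
  · rw [if_neg h0]
    have hk : 1 ≤ n.toNat := by omega
    simp only [foldA, List.nil_append, Nat.zero_add, foldB]
    rw [zipAll_wins n.toNat hk iterable, ← altB iterable n.toNat hk]
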